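-- pv_equiv track=rewrite | github.com/maldata/advent-of-code | 2021/19/solutions.py | get_offset_and_overlaps
-- ===== SOURCE A (Python) =====
-- def get_offset_and_overlaps(unknown_relative_coords, known_global_coords):
--     """
--     Given two sets of coordinates, find the offset that maximizes the number
--     of overlapping points (then return the number of overlaps and the offset).
--     """
--     max_overlaps = 0
--     offset_with_max_overlaps = (0, 0, 0)
--
--     num_urc = len(unknown_relative_coords)
--     num_kgc = len(known_global_coords)
--
--     indices_to_align = [(i,j) for i in range(num_urc) for j in range(num_kgc)]
--     for combo in indices_to_align:
--         mobile = unknown_relative_coords[combo[0]]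
--         fixed = known_global_coords[combo[1]]
--
--         # Find the offset between the two aligned points
--         offset = (fixed[0] - mobile[0], fixed[1] - mobile[1], fixed[2] - mobile[2])
--
--         # Move all the "mobile" points by the offset and see if that
--         # shifted position is in the list of "fixed" points
--         shifted_globals = [(kgc[0] - offset[0], kgc[1] - offset[1], kgc[2] - offset[2]) for kgc in known_global_coords]
--         overlapping_pts = filter(lambda sg: sg in unknown_relative_coords, shifted_globals)
--         num_overlaps = len(list(overlapping_pts))
--
--         if num_overlaps > max_overlaps:
--             max_overlaps = num_overlaps
--             offset_with_max_overlaps = offset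
--
--     return max_overlaps, offset_with_max_overlaps
-- ===== SOURCE B (Python) =====
-- def get_offset_and_overlaps(unknown_relative_coords, known_global_coords):
--     """
--     Same result as A, but the overlap count for every candidate offset is
--     precomputed once in a hash-map counter (offset -> frequency of the
--     difference kgc - urc), so the inner O(urc*kgc) membership scan of A
--     disappears; the combo order is replayed only for the tie-breaking.
--     """
--     urc_set = set(unknown_relative_coords)
--     counts = {}
--     for p in known_global_coords:
--         for u in urc_set:
--             d = (p[0] - u[0], p[1] - u[1], p[2] - u[2])
--             counts[d] = counts.get(d, 0) + 1
--     max_overlaps = 0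
--     offset_with_max_overlaps = (0, 0, 0)
--     for u in unknown_relative_coords:
--         for p in known_global_coords:
--             offset = (p[0] - u[0], p[1] - u[1], p[2] - u[2])
--             c = counts.get(offset, 0)
--             if c > max_overlaps:
--                 max_overlaps = c
--                 offset_with_max_overlaps = offset
--     return max_overlaps, offset_with_max_overlaps
-- ===== Notes on version B (the rewrite author's own statement) =====
-- stated objective: faster
-- what changed: Replaces A's per-pair rescan (for every (i,j) pair, shift all of kgc and test each shifted point for list membership in urc) by one hash counter of all differences kgc-point minus distinct urc-point, whose frequency IS the overlap count; the pair order is then replayed with O(1) lookups to keep A's first-strict-maximum tie-break.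
import Mathlib
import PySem

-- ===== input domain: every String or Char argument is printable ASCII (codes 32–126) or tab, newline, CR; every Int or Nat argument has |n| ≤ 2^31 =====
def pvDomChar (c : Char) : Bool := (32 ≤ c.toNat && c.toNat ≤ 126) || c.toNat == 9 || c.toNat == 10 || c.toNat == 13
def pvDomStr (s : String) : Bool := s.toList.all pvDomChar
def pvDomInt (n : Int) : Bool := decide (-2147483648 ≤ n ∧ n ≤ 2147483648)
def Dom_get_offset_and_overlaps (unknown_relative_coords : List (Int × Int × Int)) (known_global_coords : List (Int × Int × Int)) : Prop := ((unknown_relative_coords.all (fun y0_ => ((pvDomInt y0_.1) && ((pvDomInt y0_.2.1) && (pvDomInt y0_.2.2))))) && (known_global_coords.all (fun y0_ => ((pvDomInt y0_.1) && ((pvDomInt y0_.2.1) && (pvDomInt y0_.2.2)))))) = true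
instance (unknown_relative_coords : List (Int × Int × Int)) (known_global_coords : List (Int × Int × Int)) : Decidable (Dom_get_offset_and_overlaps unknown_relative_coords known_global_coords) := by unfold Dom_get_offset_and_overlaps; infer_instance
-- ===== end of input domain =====

-- B replaces A's per-pair O(urc*kgc) membership rescan by one hash counter of
-- differences whose frequency is the overlap count (objective: faster).

-- ===== PORT A =====
-- literal port of A: for every index pair (i, j), compute the offset, shift all of
-- known_global_coords by it and count shifted points that are members of
-- unknown_relative_coords; keep the first strict maximum.
def get_offset_and_overlaps (unknown_relative_coords : List (Int × Int × Int)) (known_global_coords : List (Int × Int × Int)) : Int × (Int × Int × Int) :=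
  let num_urc : Int := PySem.List.len unknown_relative_coords
  let num_kgc : Int := PySem.List.len known_global_coords
  let indices_to_align : List (Int × Int) :=
    (PySem.List.pyRange 0 num_urc 1).flatMap (fun i => (PySem.List.pyRange 0 num_kgc 1).map (fun j => (i, j)))
  indices_to_align.foldl (fun s combo =>
    -- indices come from range(len(...)), so indexing never raises; the default is unreachable
    let mobile := PySem.List.pyGetD unknown_relative_coords combo.1 (0, 0, 0)
    let fixed := PySem.List.pyGetD known_global_coords combo.2 (0, 0, 0)
    let offset : Int × Int × Int := (fixed.1 - mobile.1, fixed.2.1 - mobile.2.1, fixed.2.2 - mobile.2.2)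
    let shifted_globals := known_global_coords.map (fun kgc => (kgc.1 - offset.1, kgc.2.1 - offset.2.1, kgc.2.2 - offset.2.2))
    let num_overlaps : Int := ((shifted_globals.filter (fun sg => decide (sg ∈ unknown_relative_coords))).length : Int)
    if num_overlaps > s.1 then (num_overlaps, offset) else s)
    (0, (0, 0, 0))

-- ===== PORT B =====
-- literal port of Source B: build the counter of all differences p - u (u over the set of
-- unknown_relative_coords), then replay the pair order with O(1) lookups.
-- (Source B iterates the Python set in hash order; the counter's lookups do not depend on it.)
def get_offset_and_overlaps_alt (unknown_relative_coords : List (Int × Int × Int)) (known_global_coords : List (Int × Int × Int)) : Int × (Int × Int × Int) :=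
  let urc_set : PySem.Set (Int × Int × Int) := PySem.Set.ofList unknown_relative_coords
  let counts : PySem.Dict (Int × Int × Int) Int :=
    known_global_coords.foldl (fun cs p =>
      urc_set.foldl (fun cs u =>
        let d : Int × Int × Int := (p.1 - u.1, p.2.1 - u.2.1, p.2.2 - u.2.2)
        cs.insert d (cs.getD d 0 + 1)) cs)
      PySem.Dict.empty
  unknown_relative_coords.foldl (fun s u =>
    known_global_coords.foldl (fun s p =>
      let offset : Int × Int × Int := (p.1 - u.1, p.2.1 - u.2.1, p.2.2 - u.2.2)
      let c : Int := counts.getD offset 0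
      if c > s.1 then (c, offset) else s) s)
    (0, (0, 0, 0))

-- ===== PRECONDITION & SPEC =====
def Spec_get_offset_and_overlaps (unknown_relative_coords : List (Int × Int × Int)) (known_global_coords : List (Int × Int × Int)) (out : Int × (Int × Int × Int)) : Prop := out = get_offset_and_overlaps_alt unknown_relative_coords known_global_coords
instance (unknown_relative_coords : List (Int × Int × Int)) (known_global_coords : List (Int × Int × Int)) (out : Int × (Int × Int × Int)) : Decidable (Spec_get_offset_and_overlaps unknown_relative_coords known_global_coords out) := by unfold Spec_get_offset_and_overlaps; infer_instance

-- ===== CLAIM (what is proved, stated in full; the proofs are below) =====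
def Claim_equal_get_offset_and_overlaps : Prop := ∀ (unknown_relative_coords : List (Int × Int × Int)) (known_global_coords : List (Int × Int × Int)), Dom_get_offset_and_overlaps unknown_relative_coords known_global_coords → Spec_get_offset_and_overlaps unknown_relative_coords known_global_coords (get_offset_and_overlaps unknown_relative_coords known_global_coords)

-- ===== LEMMAS AND PROOFS =====

-- a nested loop over two ranges indexing into the lists is the nested loop over the lists
theorem pv_nested_range_fold {σ : Type} (xs ys : List (Int × Int × Int))
    (g : σ → (Int × Int × Int) → (Int × Int × Int) → σ) (init : σ) :
    (PySem.List.pyRange 0 (PySem.List.len xs) 1).foldl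
      (fun s i => (PySem.List.pyRange 0 (PySem.List.len ys) 1).foldl
        (fun s j => g s (PySem.List.pyGetD xs i (0, 0, 0)) (PySem.List.pyGetD ys j (0, 0, 0))) s) init
    = xs.foldl (fun s u => ys.foldl (fun s p => g s u p) s) init := by
  refine Eq.trans
    (PySem.List.foldl_pyRange_zero_pyGetD xs (0, 0, 0)
      (fun s u => (PySem.List.pyRange 0 (PySem.List.len ys) 1).foldl
        (fun s j => g s u (PySem.List.pyGetD ys j (0, 0, 0))) s) init) ?_
  apply PySem.List.foldl_congr_mem
  intro acc u _
  exact PySem.List.foldl_pyRange_zero_pyGetD ys (0, 0, 0) (fun s p => g s u p) acc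

-- how many images p - u (u over a nodup list) equal q: one iff p - q is in the list
theorem pv_count_map_sub (us : List (Int × Int × Int)) (hnd : us.Nodup) (p q : Int × Int × Int) :
    List.count q (us.map (fun u => (p.1 - u.1, p.2.1 - u.2.1, p.2.2 - u.2.2)))
    = if (p.1 - q.1, p.2.1 - q.2.1, p.2.2 - q.2.2) ∈ us then 1 else 0 := by
  have hpred : ∀ u : Int × Int × Int,
      ((p.1 - u.1, p.2.1 - u.2.1, p.2.2 - u.2.2) == q)
      = (u == (p.1 - q.1, p.2.1 - q.2.1, p.2.2 - q.2.2)) := by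
    intro u
    rcases u with ⟨a, b, c⟩; rcases p with ⟨x, y, z⟩; rcases q with ⟨d, e, f⟩
    rw [Bool.eq_iff_iff, beq_iff_eq, beq_iff_eq]
    simp only [Prod.mk.injEq]
    constructor <;> (intro hh; refine ⟨?_, ?_, ?_⟩ <;> omega)
  induction us with
  | nil => simp
  | cons u t ih =>
    rw [List.map_cons, List.count_cons, ih (List.nodup_cons.mp hnd).2]
    have hu := hpred u
    by_cases h : u = (p.1 - q.1, p.2.1 - q.2.1, p.2.2 - q.2.2)
    · have hnt : (p.1 - q.1, p.2.1 - q.2.1, p.2.2 - q.2.2) ∉ t := h ▸ (List.nodup_cons.mp hnd).1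
      simp [h, hnt]
    · have : ¬ ((p.1 - u.1, p.2.1 - u.2.1, p.2.2 - u.2.2) == q) = true := by
        rw [hu]; simpa using h
      by_cases hm : (p.1 - q.1, p.2.1 - q.2.1, p.2.2 - q.2.2) ∈ t <;>
        simp [hm, this, Ne.symm h]

-- frequency of q among all differences p - u = number of kgc points p with p - q ∈ urc
theorem pv_count_diffs (urc : List (Int × Int × Int)) (q : Int × Int × Int) :
    ∀ kgc : List (Int × Int × Int),
    List.count q (kgc.flatMap (fun p => (PySem.Set.ofList urc).map
        (fun u => (p.1 - u.1, p.2.1 - u.2.1, p.2.2 - u.2.2))))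
    = kgc.countP (fun p => decide ((p.1 - q.1, p.2.1 - q.2.1, p.2.2 - q.2.2) ∈ urc)) := by
  intro kgc
  induction kgc with
  | nil => simp
  | cons p t ih =>
    rw [List.flatMap_cons, List.count_append, ih, List.countP_cons,
      pv_count_map_sub _ (PySem.Set.nodup_ofList urc) p q]
    by_cases h : (p.1 - q.1, p.2.1 - q.2.1, p.2.2 - q.2.2) ∈ urc
    · simp [h, PySem.Set.mem_ofList]; omega
    · simp [h, PySem.Set.mem_ofList]

-- the counter built by B's nested loops gives A's overlap count for every offset
theorem pv_counts_getD (urc kgc : List (Int × Int × Int)) (q : Int × Int × Int) :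
    (kgc.foldl (fun cs p =>
        (PySem.Set.ofList urc).foldl (fun cs u =>
          cs.insert (p.1 - u.1, p.2.1 - u.2.1, p.2.2 - u.2.2)
            (cs.getD (p.1 - u.1, p.2.1 - u.2.1, p.2.2 - u.2.2) 0 + 1)) cs)
      PySem.Dict.empty).getD q 0
    = (kgc.countP (fun p => decide ((p.1 - q.1, p.2.1 - q.2.1, p.2.2 - q.2.2) ∈ urc)) : Int) := by
  have hfold : (kgc.foldl (fun cs p =>
        (PySem.Set.ofList urc).foldl (fun cs u =>
          cs.insert (p.1 - u.1, p.2.1 - u.2.1, p.2.2 - u.2.2)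
            (cs.getD (p.1 - u.1, p.2.1 - u.2.1, p.2.2 - u.2.2) 0 + 1)) cs)
      (PySem.Dict.empty : PySem.Dict (Int × Int × Int) Int))
      = (kgc.flatMap (fun p => (PySem.Set.ofList urc).map
          (fun u => (p.1 - u.1, p.2.1 - u.2.1, p.2.2 - u.2.2)))).foldl
          (fun cs x => cs.insert x (cs.getD x 0 + 1)) PySem.Dict.empty := by
    rw [List.foldl_flatMap]
    apply PySem.List.foldl_congr_mem
    intro cs p _
    rw [List.foldl_map]
  rw [hfold, PySem.Dict.getD_foldl_insert_add_one, pv_count_diffs urc q kgc]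
  simp [PySem.Dict.getD_empty]

theorem pv_main (urc kgc : List (Int × Int × Int)) :
    get_offset_and_overlaps urc kgc = get_offset_and_overlaps_alt urc kgc := by
  unfold get_offset_and_overlaps get_offset_and_overlaps_alt
  simp only [List.foldl_flatMap, List.foldl_map]
  rw [pv_nested_range_fold urc kgc
    (fun s mobile fixed =>
      let offset : Int × Int × Int := (fixed.1 - mobile.1, fixed.2.1 - mobile.2.1, fixed.2.2 - mobile.2.2)
      let shifted := kgc.map (fun k => (k.1 - offset.1, k.2.1 - offset.2.1, k.2.2 - offset.2.2))
      let num : Int := ((shifted.filter (fun sg => decide (sg ∈ urc))).length : Int)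
      if num > s.1 then (num, offset) else s) (0, (0, 0, 0))]
  apply PySem.List.foldl_congr_mem
  intro acc u _
  apply PySem.List.foldl_congr_mem
  intro acc' p _
  simp only
  rw [pv_counts_getD urc kgc (p.1 - u.1, p.2.1 - u.2.1, p.2.2 - u.2.2)]
  rw [← List.countP_eq_length_filter, List.countP_map]
  rfl

-- ===== VERDICT (by name: the statement is the Claim_ definition above) =====
theorem get_offset_and_overlaps_spec : Claim_equal_get_offset_and_overlaps := by
  intro urc kgc _
  unfold Spec_get_offset_and_overlaps
  exact pv_main urc kgc
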